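-- pv_equiv track=rewrite | github.com/harrrshall/twitter-memory | mcp_server/anomalies.py | detect_topic_drift
-- ===== SOURCE A (Python) =====
-- _TOPIC_DRIFT_WINDOW = 10
--
-- _TOPIC_DRIFT_THRESHOLD = 3
--
-- def detect_topic_drift(impressions_with_topics: list[tuple[str, list[str]]]) -> list[str]:
--     # impressions_with_topics is [(timestamp_iso, ["ai-tooling", "meme"]), ...]
--     # in chronological order. We check a sliding window of N impressions and
--     # flag spans that span >=K distinct topics.
--     n = len(impressions_with_topics)
--     if n < _TOPIC_DRIFT_WINDOW:
--         return []
--     out: list[str] = []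
--     reported_windows: set[tuple[int, int]] = set()
--     for i in range(n - _TOPIC_DRIFT_WINDOW + 1):
--         window = impressions_with_topics[i : i + _TOPIC_DRIFT_WINDOW]
--         topics = set()
--         for _, tags in window:
--             for t in tags:
--                 if t != "untagged":
--                     topics.add(t)
--         if len(topics) >= _TOPIC_DRIFT_THRESHOLD:
--             # Dedupe overlapping windows: only report the first in each run
--             key = (i // _TOPIC_DRIFT_WINDOW, len(topics))
--             if key in reported_windows:
--                 continue
--             reported_windows.add(key)
--             start_ts, _ = window[0]
--             end_ts, _ = window[-1]
--             start_hm = start_ts[11:16] if len(start_ts) >= 16 else start_ts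
--             end_hm = end_ts[11:16] if len(end_ts) >= 16 else end_ts
--             out.append(
--                 f"{start_hm}-{end_hm} — topic drift across "
--                 f"{', '.join(sorted(topics))} ({len(topics)} topics in a "
--                 f"{_TOPIC_DRIFT_WINDOW}-impression window)."
--             )
--     return out
-- ===== SOURCE B (Python) =====
-- def detect_topic_drift(impressions_with_topics):
--     n = len(impressions_with_topics)
--     if n < 10:
--         return []
--     # Running multiset of non-'untagged' tags in the current 10-impression window.
--     counts = {}
--     for _, tags in impressions_with_topics[:10]:
--         for t in tags:
--             if t != "untagged":
--                 counts[t] = counts.get(t, 0) + 1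
--     out = []
--     seen = set()
--     for i in range(n - 9):
--         if i > 0:
--             # slide: drop impression i-1, add impression i+9
--             for t in impressions_with_topics[i - 1][1]:
--                 if t != "untagged":
--                     c = counts.get(t, 0) - 1
--                     if c <= 0:
--                         counts.pop(t, None)
--                     else:
--                         counts[t] = c
--             for t in impressions_with_topics[i + 9][1]:
--                 if t != "untagged":
--                     counts[t] = counts.get(t, 0) + 1
--         k = len(counts)
--         if k >= 3:
--             key = (i // 10, k)
--             if key not in seen:
--                 seen.add(key)
--                 start_ts = impressions_with_topics[i][0]
--                 end_ts = impressions_with_topics[i + 9][0]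
--                 start_hm = start_ts[11:16] if len(start_ts) >= 16 else start_ts
--                 end_hm = end_ts[11:16] if len(end_ts) >= 16 else end_ts
--                 out.append(
--                     f"{start_hm}-{end_hm} — topic drift across "
--                     f"{', '.join(sorted(counts))} ({k} topics in a "
--                     f"10-impression window)."
--                 )
--     return out
-- ===== Notes on version B (the rewrite author's own statement) =====
-- stated objective: alternative
-- what changed: Replaces A's per-window rebuild of the topic set (slice + nested set-insertion loops for every window position) by one running tag counter (dict multiset) initialized on the first window and updated incrementally as the window slides, deriving each window's distinct-topic count and sorted topic names from the live counter.
import Mathlib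
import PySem

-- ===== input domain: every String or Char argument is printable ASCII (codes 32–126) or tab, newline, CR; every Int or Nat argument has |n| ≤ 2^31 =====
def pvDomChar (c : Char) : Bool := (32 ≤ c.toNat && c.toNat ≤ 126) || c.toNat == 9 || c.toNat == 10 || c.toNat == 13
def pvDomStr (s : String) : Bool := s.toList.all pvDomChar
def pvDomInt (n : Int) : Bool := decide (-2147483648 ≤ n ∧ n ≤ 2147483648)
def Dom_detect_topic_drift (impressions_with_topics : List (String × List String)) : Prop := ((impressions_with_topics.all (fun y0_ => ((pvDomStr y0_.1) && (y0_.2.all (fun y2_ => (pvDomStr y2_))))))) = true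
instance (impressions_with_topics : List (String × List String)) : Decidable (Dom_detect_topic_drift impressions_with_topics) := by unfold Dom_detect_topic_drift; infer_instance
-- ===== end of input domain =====

-- B replaces A's per-window rebuild of the topic set by one running tag counter updated
-- incrementally as the window slides (alternative data structure, identical results).


-- ===== PORT A =====
-- the report line; identical f-string in both Pythons, ported once as ''.join of the pieces
def driftMsg (start_hm end_hm : String) (names : List String) (k : Int) : String :=
  PySem.Str.join "" [start_hm, "-", end_hm, " — topic drift across ",
    PySem.Str.join ", " names, " (", PySem.Int.toStr k,
    " topics in a 10-impression window)."]

-- ts[11:16] if len(ts) >= 16 else ts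
def hhmm (ts : String) : String :=
  if 16 ≤ PySem.Str.len ts then PySem.Str.slice ts (some 11) (some 16) else ts

-- one iteration of A's window loop (state: out, reported_windows)
def driftStepA (xs : List (String × List String))
    (st : List String × PySem.Set (Int × Int)) (i : Int) :
    List String × PySem.Set (Int × Int) :=
  let window := PySem.List.slice xs (some i) (some (i + 10))
  let topics : PySem.Set String :=
    window.foldl (fun ts p =>
        p.2.foldl (fun ts t => if t ≠ "untagged" then PySem.Set.add ts t else ts) ts)
      PySem.Set.empty
  if 3 ≤ topics.length then
    let key : Int × Int := (PySem.Int.floordiv i 10, (topics.length : Int))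
    if PySem.Set.contains st.2 key then st
    else
      -- window[0] / window[-1]: window has length 10 here, the default is never used
      let start_ts := ((PySem.List.pyGet? window 0).getD ("", [])).1
      let end_ts := ((PySem.List.pyGet? window (-1)).getD ("", [])).1
      (st.1 ++ [driftMsg (hhmm start_ts) (hhmm end_ts)
          (PySem.List.sorted topics (fun x => x) false) (topics.length : Int)],
       PySem.Set.add st.2 key)
  else st

def detect_topic_drift (impressions_with_topics : List (String × List String)) : List String :=
  let n : Int := impressions_with_topics.length
  if n < 10 then []
  else
    ((PySem.List.pyRange 0 (n - 10 + 1) 1).foldl (driftStepA impressions_with_topics)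
      ([], PySem.Set.empty)).1

-- ===== PORT B =====
-- counts[t] = counts.get(t, 0) + 1 for each non-'untagged' t in tags
def driftAdd (d : PySem.Dict String Int) (tags : List String) : PySem.Dict String Int :=
  tags.foldl (fun d t => if t ≠ "untagged" then d.insert t (d.getD t 0 + 1) else d) d

-- the sliding decrement: c = counts.get(t, 0) - 1; pop at c <= 0, else store c
def driftSub (d : PySem.Dict String Int) (tags : List String) : PySem.Dict String Int :=
  tags.foldl (fun d t =>
    if t ≠ "untagged" then
      let c := d.getD t 0 - 1
      if c ≤ 0 then d.erase t else d.insert t c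
    else d) d

-- the report/dedup part of one iteration of B's loop, after the counter has slid
def driftCheck (xs : List (String × List String)) (counts : PySem.Dict String Int)
    (out : List String) (seen : PySem.Set (Int × Int)) (i : Int) :
    PySem.Dict String Int × List String × PySem.Set (Int × Int) :=
  let k := counts.size
  if 3 ≤ k then
    let key : Int × Int := (PySem.Int.floordiv i 10, (k : Int))
    if PySem.Set.contains seen key then (counts, out, seen)
    else
      let start_ts := ((PySem.List.pyGet? xs i).getD ("", [])).1
      let end_ts := ((PySem.List.pyGet? xs (i + 9)).getD ("", [])).1
      (counts,
       out ++ [driftMsg (hhmm start_ts) (hhmm end_ts)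
          (PySem.List.sorted counts.keys (fun x => x) false) (k : Int)],
       PySem.Set.add seen key)
  else (counts, out, seen)

-- one iteration of B's loop (state: counts, out, seen); slides the counter first when i > 0
def driftStepB (xs : List (String × List String))
    (st : PySem.Dict String Int × List String × PySem.Set (Int × Int)) (i : Int) :
    PySem.Dict String Int × List String × PySem.Set (Int × Int) :=
  let counts :=
    if 0 < i then
      driftAdd (driftSub st.1 (((PySem.List.pyGet? xs (i - 1)).getD ("", [])).2))
        (((PySem.List.pyGet? xs (i + 9)).getD ("", [])).2)
    else st.1
  driftCheck xs counts st.2.1 st.2.2 i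

def detect_topic_drift_alt (impressions_with_topics : List (String × List String)) : List String :=
  let n : Int := impressions_with_topics.length
  if n < 10 then []
  else
    let counts0 : PySem.Dict String Int :=
      (PySem.List.slice impressions_with_topics none (some 10)).foldl
        (fun d p => driftAdd d p.2) PySem.Dict.empty
    ((PySem.List.pyRange 0 (n - 9) 1).foldl (driftStepB impressions_with_topics)
      (counts0, [], PySem.Set.empty)).2.1

-- ===== PRECONDITION & SPEC =====
def Spec_detect_topic_drift (impressions_with_topics : List (String × List String)) (out : List String) : Prop := out = detect_topic_drift_alt impressions_with_topics
instance (impressions_with_topics : List (String × List String)) (out : List String) : Decidable (Spec_detect_topic_drift impressions_with_topics out) := by unfold Spec_detect_topic_drift; infer_instance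

-- ===== CLAIM (what is proved, stated in full; the proofs are below) =====
def Claim_equal_detect_topic_drift : Prop := ∀ (impressions_with_topics : List (String × List String)), Dom_detect_topic_drift impressions_with_topics → Spec_detect_topic_drift impressions_with_topics (detect_topic_drift impressions_with_topics)

-- ===== LEMMAS AND PROOFS =====

-- proof-only notation: the non-'untagged' tags of one impression, and of the window at j
def ftags (ts : List String) : List String := ts.filter (fun t => decide (t ≠ "untagged"))

def wtags (xs : List (String × List String)) (j : Nat) : List String :=
  ((xs.drop j).take 10).flatMap (fun p => ftags p.2)

-- the counter invariant: d counts exactly the multiset ms, with no dead (≤ 0) keys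
def GoodCnt (d : PySem.Dict String Int) (ms : List String) : Prop :=
  d.keys.Nodup ∧ (∀ v, d.getD v 0 = (ms.count v : Int)) ∧ (∀ v, v ∈ d.keys ↔ v ∈ ms)

lemma set_inner (ts : List String) (s : PySem.Set String) :
    ts.foldl (fun s t => if t ≠ "untagged" then PySem.Set.add s t else s) s
      = PySem.Set.update s (ftags ts) := by
  rw [PySem.List.foldl_ite_eq_foldl_filter]; rfl

lemma topicsA_eq (w : List (String × List String)) (s : PySem.Set String) :
    w.foldl (fun ts p =>
        p.2.foldl (fun ts t => if t ≠ "untagged" then PySem.Set.add ts t else ts) ts) s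
      = PySem.Set.update s (w.flatMap (fun p => ftags p.2)) := by
  induction w generalizing s with
  | nil => rfl
  | cons p w ih =>
      simp only [List.foldl_cons, List.flatMap_cons]
      rw [ih, set_inner]
      simp [PySem.Set.update, List.foldl_append]

lemma goodcnt_empty : GoodCnt PySem.Dict.empty [] := by
  refine ⟨?_, ?_, ?_⟩ <;> simp [PySem.Dict.keys, PySem.Dict.empty, PySem.Dict.getD,
    PySem.Dict.get?]

lemma map_fst_filter_ne {ν : Type} (l : List (String × ν)) (k : String) :
    (l.filter (fun p => !(p.1 == k))).map (fun p => p.1)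
      = (l.map (fun p => p.1)).filter (fun x => !(x == k)) := by
  induction l with
  | nil => rfl
  | cons p l ih => by_cases h : p.1 = k <;> simp [List.filter_cons, h, ih]

lemma keys_erase (d : PySem.Dict String Int) (k : String) :
    (d.erase k).keys = d.keys.filter (fun x => !(x == k)) := by
  simp [PySem.Dict.erase, PySem.Dict.keys, map_fst_filter_ne]

lemma nodup_keys_erase (d : PySem.Dict String Int) (k : String) (h : d.keys.Nodup) :
    (d.erase k).keys.Nodup := by
  rw [keys_erase]; exact h.filter _

lemma mem_keys_erase (d : PySem.Dict String Int) (k v : String) :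
    v ∈ (d.erase k).keys ↔ v ≠ k ∧ v ∈ d.keys := by
  rw [keys_erase]; simp [List.mem_filter, and_comm]

lemma find?_filter_ne {ν : Type} (l : List (String × ν)) (k v : String) (h : v ≠ k) :
    (l.filter (fun p => !(p.1 == k))).find? (fun p => p.1 == v)
      = l.find? (fun p => p.1 == v) := by
  induction l with
  | nil => rfl
  | cons p l ih =>
      by_cases hk : p.1 = k
      · have hv : ¬ p.1 = v := by rw [hk]; exact Ne.symm h
        simp [List.filter_cons, hk, List.find?_cons, hv, ih, Ne.symm h, h]
      · by_cases hv : p.1 = v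
        · simp [List.filter_cons, hk, List.find?_cons, hv, h]
        · simp [List.filter_cons, hk, List.find?_cons, hv, ih, h]

lemma get?_erase (d : PySem.Dict String Int) (k v : String) :
    (d.erase k).get? v = if v = k then none else d.get? v := by
  simp only [PySem.Dict.get?, PySem.Dict.erase]
  split_ifs with h
  · subst h
    rw [List.find?_eq_none.2]
    · rfl
    · intro p hp
      rw [List.mem_filter] at hp
      simpa using fun hh => by simp [hh] at hp
  · rw [find?_filter_ne _ _ _ h]

lemma getD_erase (d : PySem.Dict String Int) (k v : String) :
    (d.erase k).getD v 0 = if v = k then 0 else d.getD v 0 := by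
  simp only [PySem.Dict.getD, get?_erase]
  split_ifs <;> rfl

lemma addOne_good (d : PySem.Dict String Int) (ms : List String) (t : String)
    (h : GoodCnt d ms) : GoodCnt (d.insert t (d.getD t 0 + 1)) (ms ++ [t]) := by
  obtain ⟨h1, h2, h3⟩ := h
  refine ⟨PySem.Dict.nodup_keys_insert _ _ _ h1, ?_, ?_⟩
  · intro v
    rw [PySem.Dict.getD_insert]
    by_cases hv : v = t
    · subst hv; simp [h2 v, List.count_append]
    · have hcv : List.count v [t] = 0 := by
        simp only [List.count_singleton]
        simp [Ne.symm hv]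
      simp [hv, h2 v, List.count_append, hcv]
  · intro v
    rw [PySem.Dict.mem_keys_insert]
    by_cases hv : v = t <;> simp [hv, h3 v]

lemma driftAdd_good (ts : List String) (d : PySem.Dict String Int) (ms : List String)
    (h : GoodCnt d ms) : GoodCnt (driftAdd d ts) (ms ++ ftags ts) := by
  induction ts generalizing d ms with
  | nil => simpa [driftAdd, ftags]
  | cons t ts ih =>
      by_cases ht : t = "untagged"
      · simpa [driftAdd, ftags, ht] using ih d ms h
      · have := ih (d.insert t (d.getD t 0 + 1)) (ms ++ [t]) (addOne_good d ms t h)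
        simpa [driftAdd, ftags, ht, List.filter_cons] using this

lemma subOne_good (d : PySem.Dict String Int) (ms : List String) (t : String)
    (h : GoodCnt d ms) (hm : t ∈ ms) :
    GoodCnt (if d.getD t 0 - 1 ≤ 0 then d.erase t else d.insert t (d.getD t 0 - 1))
      (ms.erase t) := by
  obtain ⟨h1, h2, h3⟩ := h
  have hc1 : 1 ≤ ms.count t := List.one_le_count_iff.2 hm
  split_ifs with hle
  · -- count = 1 : the key is removed
    have hcnt : ms.count t = 1 := by
      have := h2 t; omega
    refine ⟨nodup_keys_erase d t h1, ?_, ?_⟩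
    · intro v
      rw [getD_erase]
      by_cases hv : v = t
      · subst hv; simp [List.count_erase_self, hcnt]
      · simp [hv, h2 v, List.count_erase_of_ne hv]
    · intro v
      rw [mem_keys_erase]
      by_cases hv : v = t
      · subst hv
        simp only [ne_eq, not_true_eq_false, false_and, false_iff]
        intro hmm
        have := List.one_le_count_iff.2 hmm
        rw [List.count_erase_self, hcnt] at this
        omega
      · simp [hv, h3 v, List.mem_erase_of_ne hv]
  · -- count ≥ 2 : the key is decremented
    have hcnt : 2 ≤ ms.count t := by
      have := h2 t; omega
    refine ⟨PySem.Dict.nodup_keys_insert _ _ _ h1, ?_, ?_⟩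
    · intro v
      rw [PySem.Dict.getD_insert]
      by_cases hv : v = t
      · subst hv
        rw [if_pos rfl, List.count_erase_self]
        have h2v := h2 v
        omega
      · simp [hv, h2 v, List.count_erase_of_ne hv]
    · intro v
      rw [PySem.Dict.mem_keys_insert]
      by_cases hv : v = t
      · subst hv
        simp only [true_or, true_iff]
        have : 1 ≤ (ms.erase v).count v := by rw [List.count_erase_self]; omega
        exact List.one_le_count_iff.1 this
      · simp [hv, h3 v, List.mem_erase_of_ne hv]

lemma driftSub_good (ts : List String) (d : PySem.Dict String Int) (ms : List String)
    (h : GoodCnt d (ftags ts ++ ms)) : GoodCnt (driftSub d ts) ms := by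
  induction ts generalizing d with
  | nil => simpa [driftSub, ftags] using h
  | cons t ts ih =>
      by_cases ht : t = "untagged"
      · have hstep : driftSub d (t :: ts) = driftSub d ts := by
          simp [driftSub, List.foldl_cons, ht]
        rw [hstep]
        exact ih d (by simpa [ftags, List.filter_cons, ht] using h)
      · have hsplit : ftags (t :: ts) ++ ms = t :: (ftags ts ++ ms) := by
          simp [ftags, List.filter_cons, ht]
        rw [hsplit] at h
        have hmem : t ∈ t :: (ftags ts ++ ms) := List.mem_cons_self
        have hone := subOne_good d _ t h hmem
        rw [List.erase_cons_head] at hone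
        have hstep : driftSub d (t :: ts)
            = driftSub (if d.getD t 0 - 1 ≤ 0 then d.erase t else d.insert t (d.getD t 0 - 1)) ts := by
          simp [driftSub, List.foldl_cons, ht]
        rw [hstep]
        exact ih _ hone

lemma keys_perm (d : PySem.Dict String Int) (ms : List String) (h : GoodCnt d ms) :
    d.keys.Perm (PySem.Set.ofList ms) := by
  refine (List.perm_ext_iff_of_nodup h.1 (PySem.Set.nodup_ofList ms)).2 ?_
  intro v
  rw [PySem.Set.mem_ofList]
  exact h.2.2 v

lemma size_eq_good (d : PySem.Dict String Int) (ms : List String) (h : GoodCnt d ms) :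
    d.size = (PySem.Set.ofList ms).length := by
  have := (keys_perm d ms h).length_eq
  simpa [PySem.Dict.size, PySem.Dict.keys] using this

lemma sorted_eq_good (d : PySem.Dict String Int) (ms : List String) (h : GoodCnt d ms) :
    PySem.List.sorted d.keys (fun x => x) false
      = PySem.List.sorted (PySem.Set.ofList ms) (fun x => x) false :=
  PySem.List.sorted_eq_sorted_of_perm _ _ _ (fun _ _ hx => hx) (keys_perm d ms h)

lemma wtags_left (xs : List (String × List String)) (j : Nat) (h : j + 10 ≤ xs.length) :
    wtags xs j = ftags ((xs[j]'(by omega)).2)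
      ++ ((xs.drop (j+1)).take 9).flatMap (fun p => ftags p.2) := by
  unfold wtags
  rw [List.drop_eq_getElem_cons (by omega : j < xs.length),
      show (10:Nat) = 9+1 from rfl, List.take_succ_cons, List.flatMap_cons]

lemma wtags_right (xs : List (String × List String)) (j : Nat) (h : j + 11 ≤ xs.length) :
    wtags xs (j+1) = ((xs.drop (j+1)).take 9).flatMap (fun p => ftags p.2)
      ++ ftags ((xs[j+10]'(by omega)).2) := by
  unfold wtags
  have h9 : 9 < (xs.drop (j+1)).length := by
    rw [List.length_drop]; omega
  have ht : (xs.drop (j+1)).take 10 = (xs.drop (j+1)).take 9 ++ [xs[j+10]'(by omega)] := by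
    conv_lhs => rw [show (10:Nat) = 9+1 from rfl]
    rw [List.take_add_one, List.getElem?_eq_getElem h9]
    simp only [List.getElem_drop, Option.toList_some]
  rw [ht, List.flatMap_append]
  simp [List.flatMap_cons]

lemma slide_good (xs : List (String × List String)) (j : Nat) (h : j + 11 ≤ xs.length)
    (d : PySem.Dict String Int) (hg : GoodCnt d (wtags xs j)) :
    GoodCnt (driftAdd (driftSub d ((xs[j]'(by omega)).2)) ((xs[j+10]'(by omega)).2))
      (wtags xs (j+1)) := by
  rw [wtags_left xs j (by omega)] at hg
  rw [wtags_right xs j h]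
  exact driftAdd_good _ _ _ (driftSub_good _ _ _ hg)

lemma init_pairs (w : List (String × List String)) (d : PySem.Dict String Int)
    (ms : List String) (h : GoodCnt d ms) :
    GoodCnt (w.foldl (fun d p => driftAdd d p.2) d)
      (ms ++ w.flatMap (fun p => ftags p.2)) := by
  induction w generalizing d ms with
  | nil => simpa using h
  | cons p w ih =>
      have := ih _ _ (driftAdd_good p.2 d ms h)
      simpa [List.flatMap_cons, List.append_assoc] using this

lemma window_eq (xs : List (String × List String)) (i : Int) (h0 : 0 ≤ i) :
    PySem.List.slice xs (some i) (some (i + 10)) = (xs.drop i.toNat).take 10 := by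
  rw [PySem.List.slice_toNat xs h0 (by omega)]
  congr 1
  omega

lemma check_eq (xs : List (String × List String)) (i : Int) (c : PySem.Dict String Int)
    (out : List String) (seen : PySem.Set (Int × Int)) (h0 : 0 ≤ i)
    (h2 : i + 10 ≤ (xs.length : Int)) (hg : GoodCnt c (wtags xs i.toNat)) :
    driftCheck xs c out seen i = (c, driftStepA xs (out, seen) i) := by
  have hlen : i.toNat + 10 ≤ xs.length := by omega
  have hwlen : ((xs.drop i.toNat).take 10).length = 10 := by
    rw [List.length_take, List.length_drop]; omega
  -- the window's topic set, as computed by A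
  have htop : ((xs.drop i.toNat).take 10).foldl (fun ts p =>
      p.2.foldl (fun ts t => if t ≠ "untagged" then PySem.Set.add ts t else ts) ts)
      PySem.Set.empty = PySem.Set.ofList (wtags xs i.toNat) := by
    rw [topicsA_eq]; rfl
  -- A's window[0] and window[-1]
  have hget0 : PySem.List.pyGet? ((xs.drop i.toNat).take 10) 0
      = some (xs[i.toNat]'(by omega)) := by
    rw [PySem.List.pyGet?_zero, List.getElem?_eq_getElem (by omega)]
    congr 1
    rw [List.getElem_take, List.getElem_drop]
    simp
  have hgetL : PySem.List.pyGet? ((xs.drop i.toNat).take 10) (-1)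
      = some (xs[i.toNat + 9]'(by omega)) := by
    rw [PySem.List.pyGet?_neg_one, List.getLast?_eq_getElem?, hwlen,
        List.getElem?_eq_getElem (by omega)]
    congr 1
    rw [List.getElem_take, List.getElem_drop]
  -- B's direct lookups
  have hbi : PySem.List.pyGet? xs i = some (xs[i.toNat]'(by omega)) :=
    PySem.List.pyGet?_eq_some_getElem xs h0 (by omega)
  have hbi9 : PySem.List.pyGet? xs (i + 9) = some (xs[i.toNat + 9]'(by omega)) := by
    have e9 : (i + 9).toNat = i.toNat + 9 := by omega
    rw [PySem.List.pyGet?_eq_some_getElem xs (by omega) (by omega)]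
    simp [e9]
  have hsize : c.size = (PySem.Set.ofList (wtags xs i.toNat)).length :=
    size_eq_good c _ hg
  have hsorted : PySem.List.sorted c.keys (fun x => x) false
      = PySem.List.sorted (PySem.Set.ofList (wtags xs i.toNat)) (fun x => x) false :=
    sorted_eq_good c _ hg
  simp only [driftCheck, driftStepA, window_eq xs i h0, htop, hget0, hgetL, hbi, hbi9,
    hsize, hsorted, Option.getD_some]
  split_ifs <;> rfl

lemma loop_eq (xs : List (String × List String)) :
    ∀ (k : Nat) (a : Int) (d : PySem.Dict String Int) (out : List String)
      (seen : PySem.Set (Int × Int)),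
      1 ≤ a → ((xs.length : Int) - 9 - a).toNat = k →
      GoodCnt d (wtags xs (a - 1).toNat) →
      (PySem.List.pyRange a ((xs.length : Int) - 10 + 1) 1).foldl (driftStepA xs) (out, seen)
        = ((PySem.List.pyRange a ((xs.length : Int) - 9) 1).foldl (driftStepB xs)
            (d, out, seen)).2 := by
  intro k
  induction k with
  | zero =>
      intro a d out seen ha hk _
      rw [PySem.List.pyRange_one_eq_nil (by omega), PySem.List.pyRange_one_eq_nil (by omega)]
      rfl
  | succ k ih =>
      intro a d out seen ha hk hg
      rw [PySem.List.pyRange_one_cons (by omega : a < (xs.length : Int) - 10 + 1),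
          PySem.List.pyRange_one_cons (by omega : a < (xs.length : Int) - 9)]
      simp only [List.foldl_cons]
      -- the impressions leaving and entering the window
      have hj11 : (a - 1).toNat + 11 ≤ xs.length := by omega
      have hgm1 : PySem.List.pyGet? xs (a - 1) = some (xs[(a - 1).toNat]'(by omega)) :=
        PySem.List.pyGet?_eq_some_getElem xs (by omega) (by omega)
      have hgp9 : PySem.List.pyGet? xs (a + 9) = some (xs[(a - 1).toNat + 10]'(by omega)) := by
        have e9 : (a + 9).toNat = (a - 1).toNat + 10 := by omega
        rw [PySem.List.pyGet?_eq_some_getElem xs (by omega) (by omega)]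
        simp [e9]
      -- B's step at a slides the counter, then reports exactly like A's step
      have hslid := slide_good xs ((a - 1).toNat) hj11 d hg
      have ea : (a - 1).toNat + 1 = a.toNat := by omega
      rw [ea] at hslid
      have hB : driftStepB xs (d, out, seen) a
          = driftCheck xs
              (driftAdd (driftSub d ((xs[(a - 1).toNat]'(by omega)).2))
                ((xs[(a - 1).toNat + 10]'(by omega)).2)) out seen a := by
        simp only [driftStepB, if_pos (by omega : (0:Int) < a), hgm1, hgp9, Option.getD_some]
      have hC := check_eq xs a _ out seen (by omega) (by omega) hslid
      rw [hB, hC]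
      rcases hA : driftStepA xs (out, seen) a with ⟨out', seen'⟩
      have := ih (a + 1)
        (driftAdd (driftSub d ((xs[(a - 1).toNat]'(by omega)).2))
          ((xs[(a - 1).toNat + 10]'(by omega)).2)) out' seen' (by omega) (by omega)
        (by rw [show (a + 1 - 1 : Int) = a from by ring]; exact hslid)
      exact this

-- ===== VERDICT (by name: the statement is the Claim_ definition above) =====
theorem detect_topic_drift_spec : Claim_equal_detect_topic_drift := by
  unfold Claim_equal_detect_topic_drift Spec_detect_topic_drift
  intro xs _
  by_cases hn : (xs.length : Int) < 10
  · simp [detect_topic_drift, detect_topic_drift_alt, hn]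
  · rw [not_lt] at hn
    simp only [detect_topic_drift, detect_topic_drift_alt, if_neg (not_lt.2 hn)]
    -- the initial counter counts window 0
    have hinit : GoodCnt ((PySem.List.slice xs none (some 10)).foldl
        (fun d p => driftAdd d p.2) PySem.Dict.empty) (wtags xs 0) := by
      have h10 := init_pairs ((xs.drop 0).take 10) PySem.Dict.empty [] goodcnt_empty
      have hsl : PySem.List.slice xs none (some (10:Int)) = xs.take 10 := by
        simp [PySem.List.slice_to]
      rw [hsl]
      simpa [wtags] using h10
    -- peel the first iteration (i = 0): B does not slide there
    rw [PySem.List.pyRange_one_cons (by omega : (0:Int) < (xs.length : Int) - 10 + 1),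
        PySem.List.pyRange_one_cons (by omega : (0:Int) < (xs.length : Int) - 9)]
    simp only [List.foldl_cons]
    have hB0 : driftStepB xs
        ((PySem.List.slice xs none (some 10)).foldl (fun d p => driftAdd d p.2)
          PySem.Dict.empty, [], PySem.Set.empty) 0
        = ((PySem.List.slice xs none (some 10)).foldl (fun d p => driftAdd d p.2)
            PySem.Dict.empty,
           driftStepA xs ([], PySem.Set.empty) 0) := by
      simp only [driftStepB, if_neg (lt_irrefl (0:Int))]
      exact check_eq xs 0 _ [] PySem.Set.empty le_rfl (by omega) (by simpa using hinit)
    rw [hB0]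
    rcases hA : driftStepA xs ([], PySem.Set.empty) 0 with ⟨out', seen'⟩
    have := loop_eq xs ((xs.length : Int) - 10).toNat 1 _ out' seen' le_rfl (by omega)
      (by simpa using hinit)
    exact congrArg Prod.fst this
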